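-- pv_equiv track=rewrite | github.com/louspringer/tidb-agentx-hackathon | git_enhanced_ast_fixer.py | is_in_function_context
-- ===== SOURCE A (Python) =====
-- from typing import Dict, List, Any, Optional, Tuple
--
-- def is_in_function_context(line_num: int, all_lines: List[str]) -> bool:
--     """Check if we're inside a function or class definition"""
--     for i in range(line_num - 1, -1, -1):
--         line = all_lines[i].strip()
--         if line.startswith(('def ', 'class ')):
--             return True
--         elif line.startswith(('import ', 'from ')):
--             return False
--     return False
-- ===== SOURCE B (Python) =====
-- def _marker(line):
--     """Classify one line: True for def/class, False for import/from, None otherwise."""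
--     s = line.strip()
--     if s.startswith(('def ', 'class ')):
--         return True
--     if s.startswith(('import ', 'from ')):
--         return False
--     return None
--
-- def is_in_function_context(line_num, all_lines):
--     """Check if we're inside a function or class definition"""
--     marks = [_marker(line) for line in all_lines[:max(line_num, 0)]]
--     relevant = [m for m in marks if m is not None]
--     return relevant[-1] if relevant else False
-- ===== Notes on version B (the rewrite author's own statement) =====
-- stated objective: alternative
-- what changed: Replaced the backward early-return index scan with staged list passes: classify each prefix line into a ternary marker, filter out the non-markers, and return the last marker (the last marker in forward order is the nearest preceding one).
import Mathlib
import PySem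

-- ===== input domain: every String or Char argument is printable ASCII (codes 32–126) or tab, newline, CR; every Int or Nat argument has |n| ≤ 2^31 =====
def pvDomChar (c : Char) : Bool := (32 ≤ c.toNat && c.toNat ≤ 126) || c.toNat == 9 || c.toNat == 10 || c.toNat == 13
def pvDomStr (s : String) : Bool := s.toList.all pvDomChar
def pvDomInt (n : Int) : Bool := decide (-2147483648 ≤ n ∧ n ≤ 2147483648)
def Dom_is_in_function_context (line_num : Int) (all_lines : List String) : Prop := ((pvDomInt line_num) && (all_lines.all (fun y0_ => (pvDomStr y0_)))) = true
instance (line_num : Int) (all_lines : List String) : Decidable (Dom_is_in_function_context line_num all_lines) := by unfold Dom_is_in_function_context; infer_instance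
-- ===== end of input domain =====

-- B replaces A's backward early-return index scan by staged passes over the prefix:
-- classify each line into an Option Bool marker, filter the markers, return the last one
-- (objective: alternative; same cost, different decomposition).

-- ===== PORT A =====
-- backward loop 'for i in range(line_num-1, -1, -1)' with early returns
def pvGoA (all_lines : List String) : List Int → Bool
  | [] => false
  | i :: rest =>
    match PySem.List.pyGet? all_lines i with
    | none => false   -- IndexError in Python; excluded by Pre_
    | some s =>
      let line := PySem.Str.strip s
      if PySem.Str.startswith line "def " || PySem.Str.startswith line "class " then true
      else if PySem.Str.startswith line "import " || PySem.Str.startswith line "from " then false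
      else pvGoA all_lines rest

def is_in_function_context (line_num : Int) (all_lines : List String) : Bool :=
  pvGoA all_lines (PySem.List.pyRange (line_num - 1) (-1) (-1))

-- ===== PORT B =====
-- _marker: True for def/class, False for import/from, None otherwise
def pvMarker (line : String) : Option Bool :=
  let s := PySem.Str.strip line
  if PySem.Str.startswith s "def " || PySem.Str.startswith s "class " then some true
  else if PySem.Str.startswith s "import " || PySem.Str.startswith s "from " then some false
  else none

def is_in_function_context_alt (line_num : Int) (all_lines : List String) : Bool :=
  let marks := (PySem.List.slice all_lines none (some (max line_num 0))).map pvMarker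
  let relevant := marks.filterMap id
  (relevant.getLast?).getD false   -- relevant[-1] if relevant else False

-- ===== PRECONDITION & SPEC =====
-- Pre_ excludes exactly the inputs where Python A raises IndexError (line_num > len(all_lines)).
def Pre_is_in_function_context (line_num : Int) (all_lines : List String) : Prop :=
  line_num ≤ (all_lines.length : Int)
instance (line_num : Int) (all_lines : List String) : Decidable (Pre_is_in_function_context line_num all_lines) := by unfold Pre_is_in_function_context; infer_instance

def pvWitness_is_in_function_context : Int × List String := (2, ["def f():", "    pass"])

def Spec_is_in_function_context (line_num : Int) (all_lines : List String) (out : Bool) : Prop := out = is_in_function_context_alt line_num all_lines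
instance (line_num : Int) (all_lines : List String) (out : Bool) : Decidable (Spec_is_in_function_context line_num all_lines out) := by unfold Spec_is_in_function_context; infer_instance

-- ===== CLAIM (what is proved, stated in full; the proofs are below) =====
def Claim_equal_is_in_function_context : Prop := ∀ (line_num : Int) (all_lines : List String), Dom_is_in_function_context line_num all_lines → Pre_is_in_function_context line_num all_lines → Spec_is_in_function_context line_num all_lines (is_in_function_context line_num all_lines)


-- ===== LEMMAS AND PROOFS =====

-- A's backward scan viewed over the list of (already fetched) lines, via pvMarker
def pvScan : List String → Bool
  | [] => false
  | s :: rest =>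
    match pvMarker s with
    | some b => b
    | none => pvScan rest

theorem pvGoA_eq_scan (all_lines : List String) (l : List Int)
    (hval : ∀ i ∈ l, (PySem.List.pyGet? all_lines i).isSome) :
    pvGoA all_lines l = pvScan (l.filterMap (PySem.List.pyGet? all_lines)) := by
  induction l with
  | nil => rfl
  | cons i rest ih =>
    obtain ⟨s, hs⟩ := Option.isSome_iff_exists.mp (hval i (by simp))
    have ih' := ih (fun j hj => hval j (by simp [hj]))
    simp only [pvGoA, hs, List.filterMap_cons, pvScan, pvMarker]
    split_ifs <;> first | rfl | exact ih'

theorem pvScan_eq_head (m : List String) :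
    pvScan m = (((m.map pvMarker).filterMap id).head?).getD false := by
  induction m with
  | nil => rfl
  | cons s rest ih =>
    cases hm : pvMarker s with
    | none => simp only [pvScan, List.map_cons, List.filterMap_cons, hm, id]; exact ih
    | some b => simp only [pvScan, List.map_cons, List.filterMap_cons, hm, id]; rfl

theorem pvRange_filterMap_get (xs : List String) (m : Nat) (hm : m ≤ xs.length) :
    (PySem.List.pyRange 0 (m : Int) 1).filterMap (PySem.List.pyGet? xs) = xs.take m := by
  induction m with
  | zero => simp [PySem.List.pyRange_one_eq_nil]
  | succ k ih =>
    have hk : k ≤ xs.length := Nat.le_of_succ_le hm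
    have hklt : k < xs.length := hm
    have hcast : ((k + 1 : Nat) : Int) = (k : Int) + 1 := by push_cast; ring
    rw [hcast, PySem.List.pyRange_one_succ_right (by positivity),
      List.filterMap_append, ih hk, List.take_add_one]
    simp [PySem.List.pyGet?_ofNat xs k hklt, List.getElem?_eq_getElem hklt]

-- ===== VERDICT (by name: the statement is the Claim_ definition above) =====
theorem is_in_function_context_spec : Claim_equal_is_in_function_context := by
  intro line_num all_lines _hdom hpre
  unfold Pre_is_in_function_context at hpre
  unfold Spec_is_in_function_context is_in_function_context is_in_function_context_alt
  by_cases hpos : line_num ≤ 0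
  · have hmax : max line_num 0 = (0 : Int) := by omega
    rw [PySem.List.pyRange_neg_one_eq_nil (by omega), hmax,
      PySem.List.slice_to all_lines (le_refl (0 : Int))]
    simp [pvGoA]
  · obtain ⟨m, rfl⟩ : ∃ m : Nat, line_num = (m : Int) := ⟨line_num.toNat, by omega⟩
    have hlen : m ≤ all_lines.length := by exact_mod_cast hpre
    have hmax : max ((m : Int)) 0 = (m : Int) := by omega
    have hrev : PySem.List.pyRange ((m : Int) - 1) (-1) (-1)
        = (PySem.List.pyRange 0 (m : Int) 1).reverse := by
      have := PySem.List.pyRange_neg_one_eq_reverse ((m : Int) - 1) (-1)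
      simpa using this
    rw [hmax, PySem.List.slice_to all_lines (by positivity), hrev,
      pvGoA_eq_scan all_lines _ (by
        intro i hi
        rw [List.mem_reverse, PySem.List.mem_pyRange_one] at hi
        rw [PySem.List.pyGet?_eq_some_getElem all_lines hi.1 (by omega)]
        rfl),
      List.filterMap_reverse, pvRange_filterMap_get all_lines m hlen, pvScan_eq_head]
    simp only [Int.toNat_natCast, List.map_reverse, List.filterMap_reverse,
      List.getLast?_eq_head?_reverse]
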